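-- pv_equiv track=rewrite | github.com/Rafsan1711/GeoAi | backend/core/inference_engine.py | _get_related_attributes
-- ===== SOURCE A (Python) =====
-- from typing import List, Dict, Optional, Tuple
--
-- def _get_related_attributes(attribute: str) -> List[str]:
--     """Get list of related attributes"""
--     # Define attribute families
--     families = {
--         'geographic': ['continent', 'region', 'hasCoast', 'isIsland',
--                       'landlocked', 'hasMountains'],
--         'demographic': ['population', 'size', 'isCapital'],
--         'cultural': ['language', 'mainReligion', 'famousFor'],
--         'environmental': ['climate', 'isNatural'],
--         'political': ['government', 'country']
--     }
--
--     # Find which family this attribute belongs to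
--     for family, attrs in families.items():
--         if attribute in attrs:
--             return [a for a in attrs if a != attribute]
--
--     return []
-- ===== SOURCE B (Python) =====
-- from typing import List, Dict, Optional, Tuple
--
-- # B: idiomatic re-implementation — a reverse sibling table built once, then a constant-time lookup.
-- _FAMILIES = {
--     'geographic': ['continent', 'region', 'hasCoast', 'isIsland',
--                   'landlocked', 'hasMountains'],
--     'demographic': ['population', 'size', 'isCapital'],
--     'cultural': ['language', 'mainReligion', 'famousFor'],
--     'environmental': ['climate', 'isNatural'],
--     'political': ['government', 'country']
-- }
--
-- _SIBLINGS: Dict[str, List[str]] = {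
--     a: [x for x in attrs if x != a]
--     for attrs in _FAMILIES.values()
--     for a in attrs
-- }
--
-- def _get_related_attributes(attribute: str) -> List[str]:
--     """Get list of related attributes"""
--     return list(_SIBLINGS.get(attribute, []))
-- ===== Notes on version B (the rewrite author's own statement) =====
-- stated objective: idiomatic
-- what changed: Replaced the per-call scan over families (membership test plus a filtering comprehension) by a reverse sibling table built once at module load, so the function body is a single dict lookup with [] default.
import Mathlib
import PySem

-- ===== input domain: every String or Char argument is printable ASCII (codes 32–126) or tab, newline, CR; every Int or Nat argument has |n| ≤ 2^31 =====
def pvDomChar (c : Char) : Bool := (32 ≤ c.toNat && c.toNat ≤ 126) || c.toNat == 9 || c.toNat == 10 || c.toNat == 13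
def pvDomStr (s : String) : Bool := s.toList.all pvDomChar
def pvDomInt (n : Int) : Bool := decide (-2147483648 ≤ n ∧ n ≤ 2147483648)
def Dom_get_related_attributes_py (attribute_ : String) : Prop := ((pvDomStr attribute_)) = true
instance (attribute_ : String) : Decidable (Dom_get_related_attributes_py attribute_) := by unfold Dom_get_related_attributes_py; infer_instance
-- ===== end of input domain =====

-- B replaces A's per-call scan over the family lists by a reverse sibling table built once and a plain lookup (objective: idiomatic).

-- ===== PORT A =====
-- the 'families' dict literal of A (B's Python carries the same literal as _FAMILIES)
def familiesA : PySem.Dict String (List String) :=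
  PySem.Dict.ofList [
    ("geographic", ["continent", "region", "hasCoast", "isIsland", "landlocked", "hasMountains"]),
    ("demographic", ["population", "size", "isCapital"]),
    ("cultural", ["language", "mainReligion", "famousFor"]),
    ("environmental", ["climate", "isNatural"]),
    ("political", ["government", "country"])]

-- A's 'for family, attrs in families.items(): if attribute in attrs: return [...]' loop
def loopA (attribute_ : String) : List (String × List String) → List String
  | [] => []
  | (_, attrs) :: rest =>
      if attrs.contains attribute_ then attrs.filter (fun a => a ≠ attribute_)
      else loopA attribute_ rest

def get_related_attributes_py (attribute_ : String) : List String :=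
  loopA attribute_ familiesA.items

-- ===== PORT B =====
-- B's _SIBLINGS dict comprehension: for each family's attrs, map each attribute to its siblings
def siblingsB : PySem.Dict String (List String) :=
  familiesA.items.foldl (fun d fa =>
    fa.2.foldl (fun d a => d.insert a (fa.2.filter (fun x => x ≠ a))) d) PySem.Dict.empty

def get_related_attributes_py_alt (attribute_ : String) : List String :=
  siblingsB.getD attribute_ []

-- ===== PRECONDITION & SPEC =====
def Spec_get_related_attributes_py (attribute_ : String) (out : List String) : Prop := out = get_related_attributes_py_alt attribute_
instance (attribute_ : String) (out : List String) : Decidable (Spec_get_related_attributes_py attribute_ out) := by unfold Spec_get_related_attributes_py; infer_instance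

-- ===== CLAIM (what is proved, stated in full; the proofs are below) =====
def Claim_equal_get_related_attributes_py : Prop := ∀ (attribute_ : String), Dom_get_related_attributes_py attribute_ → Spec_get_related_attributes_py attribute_ (get_related_attributes_py attribute_)

-- ===== LEMMAS AND PROOFS =====
theorem ports_agree (s : String) : get_related_attributes_py s = get_related_attributes_py_alt s := by
  by_cases h1 : s = "continent"; · subst h1; decide
  by_cases h2 : s = "region"; · subst h2; decide
  by_cases h3 : s = "hasCoast"; · subst h3; decide
  by_cases h4 : s = "isIsland"; · subst h4; decide
  by_cases h5 : s = "landlocked"; · subst h5; decide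
  by_cases h6 : s = "hasMountains"; · subst h6; decide
  by_cases h7 : s = "population"; · subst h7; decide
  by_cases h8 : s = "size"; · subst h8; decide
  by_cases h9 : s = "isCapital"; · subst h9; decide
  by_cases h10 : s = "language"; · subst h10; decide
  by_cases h11 : s = "mainReligion"; · subst h11; decide
  by_cases h12 : s = "famousFor"; · subst h12; decide
  by_cases h13 : s = "climate"; · subst h13; decide
  by_cases h14 : s = "isNatural"; · subst h14; decide
  by_cases h15 : s = "government"; · subst h15; decide
  by_cases h16 : s = "country"; · subst h16; decide
  -- s matches no known attribute: both sides return []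
  have hB : get_related_attributes_py_alt s = [] := by
    have hit : siblingsB.items = [("continent", ["region", "hasCoast", "isIsland", "landlocked", "hasMountains"]),
      ("region", ["continent", "hasCoast", "isIsland", "landlocked", "hasMountains"]),
      ("hasCoast", ["continent", "region", "isIsland", "landlocked", "hasMountains"]),
      ("isIsland", ["continent", "region", "hasCoast", "landlocked", "hasMountains"]),
      ("landlocked", ["continent", "region", "hasCoast", "isIsland", "hasMountains"]),
      ("hasMountains", ["continent", "region", "hasCoast", "isIsland", "landlocked"]),
      ("population", ["size", "isCapital"]), ("size", ["population", "isCapital"]),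
      ("isCapital", ["population", "size"]),
      ("language", ["mainReligion", "famousFor"]), ("mainReligion", ["language", "famousFor"]),
      ("famousFor", ["language", "mainReligion"]), ("climate", ["isNatural"]), ("isNatural", ["climate"]),
      ("government", ["country"]), ("country", ["government"])] := by decide
    simp [get_related_attributes_py_alt, PySem.Dict.getD, PySem.Dict.get?, hit,
      Ne.symm h1, Ne.symm h2, Ne.symm h3, Ne.symm h4, Ne.symm h5, Ne.symm h6, Ne.symm h7, Ne.symm h8,
      Ne.symm h9, Ne.symm h10, Ne.symm h11, Ne.symm h12, Ne.symm h13, Ne.symm h14, Ne.symm h15, Ne.symm h16]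
  rw [hB]
  have hfam : familiesA.items = [("geographic", ["continent", "region", "hasCoast", "isIsland", "landlocked", "hasMountains"]),
      ("demographic", ["population", "size", "isCapital"]), ("cultural", ["language", "mainReligion", "famousFor"]),
      ("environmental", ["climate", "isNatural"]), ("political", ["government", "country"])] := by decide
  simp only [get_related_attributes_py, hfam]
  simp [loopA, h1, h2, h3, h4, h5, h6, h7, h8, h9, h10, h11, h12, h13, h14, h15, h16]

-- ===== VERDICT (by name: the statement is the Claim_ definition above) =====
theorem get_related_attributes_py_spec : Claim_equal_get_related_attributes_py := by
  intro s _
  unfold Spec_get_related_attributes_py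
  exact ports_agree s
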